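-- pv_equiv track=rewrite | github.com/CalzitPLA/FreeCAD-FEM-OR | gui/scripts/combine_keywords.py | find_matching_keyword
-- ===== SOURCE A (Python) =====
-- from typing import Dict, List, Any, Optional, Set
--
-- def normalize_keyword_name(name: str) -> str:
--     """Normalize keyword name for comparison."""
--     # Remove leading * if present and convert to uppercase
--     return name.lstrip('*').upper()
--
-- def find_matching_keyword(keyword_name: str, keywords_list: List[Dict]) -> Optional[Dict]:
--     """Find a keyword in the list that matches the given name with flexible matching."""
--     if not keyword_name:
--         return None
--
--     normalized_name = normalize_keyword_name(keyword_name)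
--
--     # Try different match strategies in order of strictness
--     strategies = [
--         # 1. Exact match with name or title
--         lambda kw: ('name' in kw and normalize_keyword_name(kw['name']) == normalized_name) or
--                   ('title' in kw and normalize_keyword_name(kw['title']) == normalized_name),
--
--         # 2. Match without parameters in parentheses
--         lambda kw: (any(normalize_keyword_name(kw.get(field, '')).split('(')[0].strip() ==
--                        normalized_name.split('(')[0].strip()
--                        for field in ['name', 'title'] if field in kw)),
--
--         # 3. Match with common prefix (e.g., "CONTACT" matches "CONTACT_AIRBAG")
--         lambda kw: (any(normalized_name in normalize_keyword_name(kw.get(field, '')) or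
--                        normalize_keyword_name(kw.get(field, '')).startswith(normalized_name + '_') or
--                        normalized_name.startswith(normalize_keyword_name(kw.get(field, '')).split('_')[0] + '_')
--                        for field in ['name', 'title'] if field in kw)),
--
--         # 4. Match with words in any order (split by _ and check all words are present)
--         lambda kw: (any(
--             all(word in normalize_keyword_name(kw.get(field, ''))
--                 for word in normalized_name.split('_') if word)
--             for field in ['name', 'title'] if field in kw
--         ))
--     ]
--
--     # Try each strategy in order
--     for strategy in strategies:
--         for kw in keywords_list:
--             if strategy(kw):
--                 return kw
--
--     # If we get here, no match was found
--     return None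
-- ===== SOURCE B (Python) =====
-- from typing import Dict, List, Any, Optional
--
--
-- def normalize_keyword_name(name: str) -> str:
--     """Normalize keyword name for comparison."""
--     return name.lstrip('*').upper()
--
--
-- def find_matching_keyword(keyword_name: str, keywords_list: List[Dict]) -> Optional[Dict]:
--     """Single pass: for each keyword compute the normalized present field values
--     once, derive its strategy tier from them, and keep the keyword with the
--     strictly smallest tier (so earliest list position wins ties)."""
--     if not keyword_name:
--         return None
--
--     n = normalize_keyword_name(keyword_name)
--     head_n = n.split('(')[0].strip()
--     words = [w for w in n.split('_') if w]
--
--     best_tier, best = 4, None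
--     for kw in keywords_list:
--         vals = [normalize_keyword_name(kw[f]) for f in ('name', 'title') if f in kw]
--         if any(v == n for v in vals):
--             t = 0
--         elif any(v.split('(')[0].strip() == head_n for v in vals):
--             t = 1
--         elif any(n in v or v.startswith(n + '_') or
--                  n.startswith(v.split('_')[0] + '_') for v in vals):
--             t = 2
--         elif any(all(w in v for w in words) for v in vals):
--             t = 3
--         else:
--             t = 4
--         if t < best_tier:
--             best_tier, best = t, kw
--     return best
-- ===== Notes on version B (the rewrite author's own statement) =====
-- stated objective: alternative
-- what changed: A makes four passes over keywords_list (one closure per strategy); B makes a single pass that normalizes each keyword's present fields once into a value list, derives the keyword's strategy tier from it with one if/elif chain, and keeps the (tier, earliest-index)-minimal keyword via a strictly-improving best accumulator.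
import Mathlib
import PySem

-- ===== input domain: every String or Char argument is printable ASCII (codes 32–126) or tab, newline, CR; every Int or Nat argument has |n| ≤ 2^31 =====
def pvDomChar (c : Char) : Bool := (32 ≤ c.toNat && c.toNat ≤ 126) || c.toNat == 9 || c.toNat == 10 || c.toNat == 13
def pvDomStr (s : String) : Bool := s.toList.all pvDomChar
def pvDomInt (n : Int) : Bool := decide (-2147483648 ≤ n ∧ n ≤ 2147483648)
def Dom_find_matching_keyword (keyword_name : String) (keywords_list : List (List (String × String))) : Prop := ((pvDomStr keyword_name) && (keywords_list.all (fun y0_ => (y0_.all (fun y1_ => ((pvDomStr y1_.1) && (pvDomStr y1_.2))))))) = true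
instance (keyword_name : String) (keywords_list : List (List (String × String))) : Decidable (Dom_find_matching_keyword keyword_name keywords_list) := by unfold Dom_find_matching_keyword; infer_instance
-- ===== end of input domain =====

-- B replaces A's four successive scans of keywords_list (one strategy-closure per scan) by ONE
-- pass that normalizes each keyword's present fields once, derives its tier from that value
-- list, and keeps the strictly-best keyword (objective: alternative decomposition).

abbrev pvKW : Type := List (String × String)

-- ===== PORT A =====
-- normalize_keyword_name: name.lstrip('*').upper().  lstrip('*') is dropWhile (= '*'), exact.
def pvNorm (s : List Char) : List Char := PySem.Chars.upper (s.dropWhile (fun c => c == '*'))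

-- dict lookup (Python dict → assoc list, first match)
def pvGet (kw : pvKW) (f : String) : Option String := (PySem.Dict.mk kw).get? f

-- s.split('(')[0].strip()  ([0] of a sep-split is always present in Python)
def pvHead1 (s : List Char) : List Char := PySem.Chars.strip ((PySem.Chars.splitOn s ['(']).headD [])

-- A's four strategy lambdas, one closure each
def pvS1 (N : List Char) (kw : pvKW) : Bool :=
  ((pvGet kw "name").elim false (fun v => pvNorm v.toList == N)) ||
  ((pvGet kw "title").elim false (fun v => pvNorm v.toList == N))

def pvS2 (N : List Char) (kw : pvKW) : Bool :=
  ["name", "title"].any (fun f => (pvGet kw f).elim false (fun v => pvHead1 (pvNorm v.toList) == pvHead1 N))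

def pvS3 (N : List Char) (kw : pvKW) : Bool :=
  ["name", "title"].any (fun f => (pvGet kw f).elim false (fun v =>
    PySem.Chars.isIn N (pvNorm v.toList) ||
    PySem.Chars.startswith (pvNorm v.toList) (N ++ ['_']) ||
    PySem.Chars.startswith N (((PySem.Chars.splitOn (pvNorm v.toList) ['_']).headD []) ++ ['_'])))

def pvS4 (N : List Char) (kw : pvKW) : Bool :=
  ["name", "title"].any (fun f => (pvGet kw f).elim false (fun v =>
    ((PySem.Chars.splitOn N ['_']).filter (fun w => !(w == []))).all
      (fun w => PySem.Chars.isIn w (pvNorm v.toList))))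

-- inner loop: for kw in keywords_list: if strategy(kw): return kw
def pvInner (p : pvKW → Bool) : List pvKW → Option pvKW
  | [] => none
  | k :: rest => if p k then some k else pvInner p rest

-- outer loop: for strategy in strategies: …
def pvOuter (ss : List (pvKW → Bool)) (ks : List pvKW) : Option pvKW :=
  match ss with
  | [] => none
  | s :: rest =>
    match pvInner s ks with
    | some k => some k
    | none => pvOuter rest ks

def find_matching_keyword (keyword_name : String) (keywords_list : List (List (String × String))) : Option (List (String × String)) :=
  if keyword_name == "" then none
  else
    pvOuter [pvS1 (pvNorm keyword_name.toList), pvS2 (pvNorm keyword_name.toList),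
             pvS3 (pvNorm keyword_name.toList), pvS4 (pvNorm keyword_name.toList)] keywords_list

-- ===== PORT B =====
-- B's own normalizer (same Python helper, kept separate: B's port follows Source B)
def pbNorm (s : String) : List Char := PySem.Chars.upper (s.toList.dropWhile (fun c => c == '*'))

-- vals = [normalize(kw[f]) for f in ('name','title') if f in kw]
def pbVals (kw : pvKW) : List (List Char) :=
  (["name", "title"].filterMap (fun f => (PySem.Dict.mk kw).get? f)).map pbNorm

-- v.split('(')[0].strip()
def pbHead (v : List Char) : List Char := PySem.Chars.strip ((PySem.Chars.splitOn v ['(']).headD [])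

-- the tier if/elif chain of Source B, over the precomputed value list
def pbTier (n headN : List Char) (words : List (List Char)) (vals : List (List Char)) : Nat :=
  if vals.any (fun v => v == n) then 0
  else if vals.any (fun v => pbHead v == headN) then 1
  else if vals.any (fun v =>
      PySem.Chars.isIn n v ||
      PySem.Chars.startswith v (n ++ ['_']) ||
      PySem.Chars.startswith n (((PySem.Chars.splitOn v ['_']).headD []) ++ ['_'])) then 2
  else if vals.any (fun v => words.all (fun w => PySem.Chars.isIn w v)) then 3
  else 4

-- loop body: if t < best_tier: best_tier, best = t, kw
def pbStep (n headN : List Char) (words : List (List Char)) (b : Nat × Option pvKW) (kw : pvKW) : Nat × Option pvKW :=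
  let t := pbTier n headN words (pbVals kw)
  if t < b.1 then (t, some kw) else b

def find_matching_keyword_alt (keyword_name : String) (keywords_list : List (List (String × String))) : Option (List (String × String)) :=
  if keyword_name == "" then none
  else
    let n := pbNorm keyword_name
    let headN := pbHead n
    let words := (PySem.Chars.splitOn n ['_']).filter (fun w => !(w == []))
    (keywords_list.foldl (pbStep n headN words) (4, none)).2

-- ===== PRECONDITION & SPEC =====
def Spec_find_matching_keyword (keyword_name : String) (keywords_list : List (List (String × String))) (out : Option (List (String × String))) : Prop := out = find_matching_keyword_alt keyword_name keywords_list
instance (keyword_name : String) (keywords_list : List (List (String × String))) (out : Option (List (String × String))) : Decidable (Spec_find_matching_keyword keyword_name keywords_list out) := by unfold Spec_find_matching_keyword; infer_instance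

-- ===== CLAIM (what is proved, stated in full; the proofs are below) =====
def Claim_equal_find_matching_keyword : Prop := ∀ (keyword_name : String) (keywords_list : List (List (String × String))), Dom_find_matching_keyword keyword_name keywords_list → Spec_find_matching_keyword keyword_name keywords_list (find_matching_keyword keyword_name keywords_list)

-- ===== LEMMAS AND PROOFS =====

-- A-side tier function: index of the first matching strategy, 4 if none
def pvTier (p1 p2 p3 p4 : pvKW → Bool) (k : pvKW) : Nat :=
  if p1 k then 0 else if p2 k then 1 else if p3 k then 2 else if p4 k then 3 else 4

-- right-to-left recursive form of a best accumulator (≤ on the front element: earliest index wins ties)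
def pvBest (p1 p2 p3 p4 : pvKW → Bool) : List pvKW → Nat × Option pvKW
  | [] => (4, none)
  | k :: ks =>
    let r := pvBest p1 p2 p3 p4 ks
    let t := pvTier p1 p2 p3 p4 k
    if t ≤ r.1 ∧ t < 4 then (t, some k) else r

lemma pbNorm_eq (v : String) : pbNorm v = pvNorm v.toList := rfl

lemma pbHead_eq : pbHead = pvHead1 := rfl

lemma pbVals_any (kw : pvKW) (f : List Char → Bool) :
    (pbVals kw).any f =
      (((pvGet kw "name").elim false (fun v => f (pvNorm v.toList))) ||
       ((pvGet kw "title").elim false (fun v => f (pvNorm v.toList)))) := by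
  unfold pbVals pvGet
  rcases h1 : (PySem.Dict.mk kw).get? "name" with _ | v1 <;>
  rcases h2 : (PySem.Dict.mk kw).get? "title" with _ | v2 <;>
    simp [List.filterMap, h1, h2, pbNorm_eq]

lemma pbTier_eq (N : List Char) (kw : pvKW) :
    pbTier N (pvHead1 N) ((PySem.Chars.splitOn N ['_']).filter (fun w => !(w == []))) (pbVals kw)
      = pvTier (pvS1 N) (pvS2 N) (pvS3 N) (pvS4 N) kw := by
  have h1 : (pbVals kw).any (fun v => v == N) = pvS1 N kw := by
    rw [pbVals_any]; simp [pvS1]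
  have h2 : (pbVals kw).any (fun v => pbHead v == pvHead1 N) = pvS2 N kw := by
    rw [pbVals_any, pbHead_eq]; simp [pvS2]
  have h3 : (pbVals kw).any (fun v =>
      PySem.Chars.isIn N v ||
      PySem.Chars.startswith v (N ++ ['_']) ||
      PySem.Chars.startswith N (((PySem.Chars.splitOn v ['_']).headD []) ++ ['_'])) = pvS3 N kw := by
    rw [pbVals_any]; simp [pvS3]
  have h4 : (pbVals kw).any (fun v =>
      ((PySem.Chars.splitOn N ['_']).filter (fun w => !(w == []))).all
        (fun w => PySem.Chars.isIn w v)) = pvS4 N kw := by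
    rw [pbVals_any]; simp [pvS4]
  unfold pbTier pvTier
  rw [h1, h2, h3, h4]

lemma pbStep_eq (N : List Char) :
    pbStep N (pvHead1 N) ((PySem.Chars.splitOn N ['_']).filter (fun w => !(w == [])))
      = fun b kw =>
          if pvTier (pvS1 N) (pvS2 N) (pvS3 N) (pvS4 N) kw < b.1
          then (pvTier (pvS1 N) (pvS2 N) (pvS3 N) (pvS4 N) kw, some kw) else b := by
  funext b kw
  unfold pbStep
  rw [pbTier_eq]

lemma pvTier_le (p1 p2 p3 p4 : pvKW → Bool) (k : pvKW) : pvTier p1 p2 p3 p4 k ≤ 4 := by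
  unfold pvTier; split_ifs <;> omega

lemma pvP1_false (p1 p2 p3 p4 : pvKW → Bool) (y : pvKW) (h : 1 ≤ pvTier p1 p2 p3 p4 y) : p1 y = false := by
  by_cases h1 : p1 y <;> simp_all [pvTier]

lemma pvP2_false (p1 p2 p3 p4 : pvKW → Bool) (y : pvKW) (h : 2 ≤ pvTier p1 p2 p3 p4 y) : p2 y = false := by
  by_cases h1 : p1 y <;> by_cases h2 : p2 y <;> simp_all [pvTier]

lemma pvP3_false (p1 p2 p3 p4 : pvKW → Bool) (y : pvKW) (h : 3 ≤ pvTier p1 p2 p3 p4 y) : p3 y = false := by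
  by_cases h1 : p1 y <;> by_cases h2 : p2 y <;> by_cases h3 : p3 y <;> simp_all [pvTier]

lemma pvP_of_tier (p1 p2 p3 p4 : pvKW → Bool) (y : pvKW) :
    (pvTier p1 p2 p3 p4 y = 0 → p1 y = true) ∧
    (pvTier p1 p2 p3 p4 y = 1 → p2 y = true) ∧
    (pvTier p1 p2 p3 p4 y = 2 → p3 y = true) ∧
    (pvTier p1 p2 p3 p4 y = 3 → p4 y = true) := by
  by_cases h1 : p1 y <;> by_cases h2 : p2 y <;> by_cases h3 : p3 y <;> by_cases h4 : p4 y <;>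
    simp_all [pvTier]

lemma pvInner_eq_none (p : pvKW → Bool) (ks : List pvKW) (h : ∀ y ∈ ks, p y = false) :
    pvInner p ks = none := by
  induction ks with
  | nil => rfl
  | cons k ks ih =>
    have hk := h k (by simp)
    simp [pvInner, hk]; exact ih (fun y hy => h y (by simp [hy]))

lemma pvInner_some (p : pvKW → Bool) (ks : List pvKW) (h : ∃ y ∈ ks, p y = true) :
    ∃ z, pvInner p ks = some z := by
  induction ks with
  | nil => simp at h
  | cons k ks ih =>
    by_cases hk : p k
    · exact ⟨k, by simp [pvInner, hk]⟩
    · obtain ⟨y, hy, hpy⟩ := h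
      rcases List.mem_cons.mp hy with rfl | hy'
      · simp [hpy] at hk
      · obtain ⟨z, hz⟩ := ih ⟨y, hy', hpy⟩
        exact ⟨z, by simp [pvInner, hk, hz]⟩

lemma pvBest_fst_le (p1 p2 p3 p4 : pvKW → Bool) (ks : List pvKW) :
    (pvBest p1 p2 p3 p4 ks).1 ≤ 4 := by
  induction ks with
  | nil => simp [pvBest]
  | cons k ks ih => simp only [pvBest]; split <;> simp_all <;> omega

lemma pvBest_fst_four (p1 p2 p3 p4 : pvKW → Bool) (ks : List pvKW)
    (h : (pvBest p1 p2 p3 p4 ks).1 = 4) : (pvBest p1 p2 p3 p4 ks).2 = none := by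
  induction ks with
  | nil => rfl
  | cons k ks ih =>
    simp only [pvBest] at h ⊢
    by_cases hc : pvTier p1 p2 p3 p4 k ≤ (pvBest p1 p2 p3 p4 ks).1 ∧ pvTier p1 p2 p3 p4 k < 4
    · rw [if_pos hc] at h; simp at h; omega
    · rw [if_neg hc] at h ⊢; exact ih h

lemma pvBest_min (p1 p2 p3 p4 : pvKW → Bool) (ks : List pvKW) (y : pvKW) (hy : y ∈ ks) :
    (pvBest p1 p2 p3 p4 ks).1 ≤ pvTier p1 p2 p3 p4 y := by
  induction ks with
  | nil => simp at hy
  | cons k ks ih =>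
    have htle := pvTier_le p1 p2 p3 p4 k
    have hrle := pvBest_fst_le p1 p2 p3 p4 ks
    simp only [pvBest]
    by_cases hc : pvTier p1 p2 p3 p4 k ≤ (pvBest p1 p2 p3 p4 ks).1 ∧ pvTier p1 p2 p3 p4 k < 4
    · rw [if_pos hc]
      rcases List.mem_cons.mp hy with rfl | hy'
      · simp
      · have := ih hy'; simp; omega
    · rw [if_neg hc]
      rcases List.mem_cons.mp hy with rfl | hy'
      · omega
      · exact ih hy'

lemma pvBest_attains (p1 p2 p3 p4 : pvKW → Bool) (ks : List pvKW)
    (h : (pvBest p1 p2 p3 p4 ks).1 < 4) :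
    ∃ y ∈ ks, pvTier p1 p2 p3 p4 y = (pvBest p1 p2 p3 p4 ks).1 := by
  induction ks with
  | nil => simp [pvBest] at h
  | cons k ks ih =>
    simp only [pvBest] at h ⊢
    by_cases hc : pvTier p1 p2 p3 p4 k ≤ (pvBest p1 p2 p3 p4 ks).1 ∧ pvTier p1 p2 p3 p4 k < 4
    · rw [if_pos hc]
      exact ⟨k, by simp, by simp⟩
    · rw [if_neg hc] at h ⊢
      obtain ⟨y, hy, hty⟩ := ih h
      exact ⟨y, List.mem_cons_of_mem _ hy, hty⟩

lemma pvFoldl_best (p1 p2 p3 p4 : pvKW → Bool) (ks : List pvKW) :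
    ∀ b : Nat × Option pvKW, b.1 ≤ 4 →
      ks.foldl (fun b kw => if pvTier p1 p2 p3 p4 kw < b.1 then (pvTier p1 p2 p3 p4 kw, some kw) else b) b =
        (if (pvBest p1 p2 p3 p4 ks).1 < b.1 then pvBest p1 p2 p3 p4 ks else b) := by
  induction ks with
  | nil =>
    intro b hb
    simp only [List.foldl_nil, pvBest]
    rw [if_neg (by first | omega | (simp; omega))]
  | cons k ks ih =>
    intro b hb
    have htle := pvTier_le p1 p2 p3 p4 k
    have hrle := pvBest_fst_le p1 p2 p3 p4 ks
    rw [List.foldl_cons]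
    by_cases h1 : pvTier p1 p2 p3 p4 k < b.1
    · rw [show (if pvTier p1 p2 p3 p4 k < b.1 then (pvTier p1 p2 p3 p4 k, some k) else b) = (pvTier p1 p2 p3 p4 k, some k) from by simp [h1]]
      rw [ih _ (by simpa using htle)]
      simp only [pvBest]
      by_cases h2 : pvTier p1 p2 p3 p4 k ≤ (pvBest p1 p2 p3 p4 ks).1 ∧ pvTier p1 p2 p3 p4 k < 4
      · rw [if_pos h2, if_neg (by first | omega | (simp; omega)), if_pos (by first | omega | (simp; omega))]
      · rw [if_neg h2, if_pos (by first | omega | (simp; omega)), if_pos (by omega)]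
    · rw [show (if pvTier p1 p2 p3 p4 k < b.1 then (pvTier p1 p2 p3 p4 k, some k) else b) = b from by simp [h1]]
      rw [ih _ hb]
      simp only [pvBest]
      by_cases h2 : pvTier p1 p2 p3 p4 k ≤ (pvBest p1 p2 p3 p4 ks).1 ∧ pvTier p1 p2 p3 p4 k < 4
      · rw [if_pos h2, if_neg (by omega), if_neg (by first | omega | (simp; omega))]
      · rw [if_neg h2]

-- A's nested loops compute the (tier, earliest index)-minimal keyword
lemma pvChain_eq (p1 p2 p3 p4 : pvKW → Bool) (ks : List pvKW) :
    pvOuter [p1, p2, p3, p4] ks = (pvBest p1 p2 p3 p4 ks).2 := by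
  induction ks with
  | nil => rfl
  | cons k ks ih =>
    have hrle := pvBest_fst_le p1 p2 p3 p4 ks
    by_cases h1 : p1 k
    · simp [pvOuter, pvInner, pvBest, pvTier, h1]
    · by_cases h2 : p2 k
      · have ht : pvTier p1 p2 p3 p4 k = 1 := by simp [pvTier, h1, h2]
        rcases Nat.lt_or_ge (pvBest p1 p2 p3 p4 ks).1 1 with hlt | hge
        · have h0 : (pvBest p1 p2 p3 p4 ks).1 = 0 := by omega
          obtain ⟨y, hy, hty⟩ := pvBest_attains p1 p2 p3 p4 ks (by omega)
          have hp1y : p1 y = true := (pvP_of_tier p1 p2 p3 p4 y).1 (by omega)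
          obtain ⟨z, hz⟩ := pvInner_some p1 ks ⟨y, hy, hp1y⟩
          have hbest : pvBest p1 p2 p3 p4 (k :: ks) = pvBest p1 p2 p3 p4 ks := by
            simp only [pvBest, ht]; rw [if_neg]; omega
          rw [hbest, ← ih]
          simp [pvOuter, pvInner, h1, hz]
        · have hn1 : pvInner p1 ks = none :=
            pvInner_eq_none p1 ks (fun y hy =>
              pvP1_false p1 p2 p3 p4 y (le_trans hge (pvBest_min p1 p2 p3 p4 ks y hy)))
          have hbest : pvBest p1 p2 p3 p4 (k :: ks) = (1, some k) := by
            simp only [pvBest, ht]; rw [if_pos]; omega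
          rw [hbest]
          simp [pvOuter, pvInner, h1, h2, hn1]
      · by_cases h3 : p3 k
        · have ht : pvTier p1 p2 p3 p4 k = 2 := by simp [pvTier, h1, h2, h3]
          rcases Nat.lt_or_ge (pvBest p1 p2 p3 p4 ks).1 2 with hlt | hge
          · have hbest : pvBest p1 p2 p3 p4 (k :: ks) = pvBest p1 p2 p3 p4 ks := by
              simp only [pvBest, ht]; rw [if_neg]; omega
            rw [hbest, ← ih]
            obtain ⟨y, hy, hty⟩ := pvBest_attains p1 p2 p3 p4 ks (by omega)
            rcases Nat.lt_or_ge (pvBest p1 p2 p3 p4 ks).1 1 with h0 | hge1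
            · have hp1y : p1 y = true := (pvP_of_tier p1 p2 p3 p4 y).1 (by omega)
              obtain ⟨z, hz⟩ := pvInner_some p1 ks ⟨y, hy, hp1y⟩
              simp [pvOuter, pvInner, h1, hz]
            · have h1' : (pvBest p1 p2 p3 p4 ks).1 = 1 := by omega
              have hp2y : p2 y = true := (pvP_of_tier p1 p2 p3 p4 y).2.1 (by omega)
              have hn1 : pvInner p1 ks = none :=
                pvInner_eq_none p1 ks (fun y' hy' =>
                  pvP1_false p1 p2 p3 p4 y' (le_trans hge1 (pvBest_min p1 p2 p3 p4 ks y' hy')))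
              obtain ⟨z, hz⟩ := pvInner_some p2 ks ⟨y, hy, hp2y⟩
              simp [pvOuter, pvInner, h1, h2, hn1, hz]
          · have hn1 : pvInner p1 ks = none :=
              pvInner_eq_none p1 ks (fun y hy =>
                pvP1_false p1 p2 p3 p4 y (le_trans (by omega) (pvBest_min p1 p2 p3 p4 ks y hy)))
            have hn2 : pvInner p2 ks = none :=
              pvInner_eq_none p2 ks (fun y hy =>
                pvP2_false p1 p2 p3 p4 y (le_trans hge (pvBest_min p1 p2 p3 p4 ks y hy)))
            have hbest : pvBest p1 p2 p3 p4 (k :: ks) = (2, some k) := by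
              simp only [pvBest, ht]; rw [if_pos]; omega
            rw [hbest]
            simp [pvOuter, pvInner, h1, h2, h3, hn1, hn2]
        · by_cases h4 : p4 k
          · have ht : pvTier p1 p2 p3 p4 k = 3 := by simp [pvTier, h1, h2, h3, h4]
            rcases Nat.lt_or_ge (pvBest p1 p2 p3 p4 ks).1 3 with hlt | hge
            · have hbest : pvBest p1 p2 p3 p4 (k :: ks) = pvBest p1 p2 p3 p4 ks := by
                simp only [pvBest, ht]; rw [if_neg]; omega
              rw [hbest, ← ih]
              obtain ⟨y, hy, hty⟩ := pvBest_attains p1 p2 p3 p4 ks (by omega)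
              rcases Nat.lt_or_ge (pvBest p1 p2 p3 p4 ks).1 1 with h0 | hge1
              · have hp1y : p1 y = true := (pvP_of_tier p1 p2 p3 p4 y).1 (by omega)
                obtain ⟨z, hz⟩ := pvInner_some p1 ks ⟨y, hy, hp1y⟩
                simp [pvOuter, pvInner, h1, hz]
              · have hn1 : pvInner p1 ks = none :=
                  pvInner_eq_none p1 ks (fun y' hy' =>
                    pvP1_false p1 p2 p3 p4 y' (le_trans hge1 (pvBest_min p1 p2 p3 p4 ks y' hy')))
                rcases Nat.lt_or_ge (pvBest p1 p2 p3 p4 ks).1 2 with h1' | hge2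
                · have hp2y : p2 y = true := (pvP_of_tier p1 p2 p3 p4 y).2.1 (by omega)
                  obtain ⟨z, hz⟩ := pvInner_some p2 ks ⟨y, hy, hp2y⟩
                  simp [pvOuter, pvInner, h1, h2, hn1, hz]
                · have hn2 : pvInner p2 ks = none :=
                    pvInner_eq_none p2 ks (fun y' hy' =>
                      pvP2_false p1 p2 p3 p4 y' (le_trans hge2 (pvBest_min p1 p2 p3 p4 ks y' hy')))
                  have hp3y : p3 y = true := (pvP_of_tier p1 p2 p3 p4 y).2.2.1 (by omega)
                  obtain ⟨z, hz⟩ := pvInner_some p3 ks ⟨y, hy, hp3y⟩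
                  simp [pvOuter, pvInner, h1, h2, h3, hn1, hn2, hz]
            · have hn1 : pvInner p1 ks = none :=
                pvInner_eq_none p1 ks (fun y hy =>
                  pvP1_false p1 p2 p3 p4 y (le_trans (by omega) (pvBest_min p1 p2 p3 p4 ks y hy)))
              have hn2 : pvInner p2 ks = none :=
                pvInner_eq_none p2 ks (fun y hy =>
                  pvP2_false p1 p2 p3 p4 y (le_trans (by omega) (pvBest_min p1 p2 p3 p4 ks y hy)))
              have hn3 : pvInner p3 ks = none :=
                pvInner_eq_none p3 ks (fun y hy =>
                  pvP3_false p1 p2 p3 p4 y (le_trans hge (pvBest_min p1 p2 p3 p4 ks y hy)))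
              have hbest : pvBest p1 p2 p3 p4 (k :: ks) = (3, some k) := by
                simp only [pvBest, ht]; rw [if_pos]; omega
              rw [hbest]
              simp [pvOuter, pvInner, h1, h2, h3, h4, hn1, hn2, hn3]
          · have ht : pvTier p1 p2 p3 p4 k = 4 := by simp [pvTier, h1, h2, h3, h4]
            have hbest : pvBest p1 p2 p3 p4 (k :: ks) = pvBest p1 p2 p3 p4 ks := by
              simp only [pvBest, ht]; rw [if_neg]; omega
            rw [hbest, ← ih]
            simp [pvOuter, pvInner, h1, h2, h3, h4]

-- ===== VERDICT (by name: the statement is the Claim_ definition above) =====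
theorem find_matching_keyword_spec : Claim_equal_find_matching_keyword := by
  intro keyword_name keywords_list _
  unfold Spec_find_matching_keyword find_matching_keyword find_matching_keyword_alt
  by_cases h : (keyword_name == "") = true
  · rw [if_pos h, if_pos h]
  · rw [if_neg h, if_neg h]
    have hn : pbNorm keyword_name = pvNorm keyword_name.toList := rfl
    have hh : pbHead (pbNorm keyword_name) = pvHead1 (pvNorm keyword_name.toList) := rfl
    simp only [hn, pbHead_eq]
    rw [pbStep_eq]
    rw [pvFoldl_best _ _ _ _ keywords_list (4, none) (le_refl 4)]
    rw [pvChain_eq]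
    have hle := pvBest_fst_le (pvS1 (pvNorm keyword_name.toList)) (pvS2 (pvNorm keyword_name.toList))
      (pvS3 (pvNorm keyword_name.toList)) (pvS4 (pvNorm keyword_name.toList)) keywords_list
    by_cases hlt : (pvBest (pvS1 (pvNorm keyword_name.toList)) (pvS2 (pvNorm keyword_name.toList))
        (pvS3 (pvNorm keyword_name.toList)) (pvS4 (pvNorm keyword_name.toList)) keywords_list).1 < 4
    · rw [if_pos hlt]
    · rw [if_neg hlt]
      exact pvBest_fst_four (pvS1 (pvNorm keyword_name.toList)) (pvS2 (pvNorm keyword_name.toList))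
        (pvS3 (pvNorm keyword_name.toList)) (pvS4 (pvNorm keyword_name.toList)) keywords_list
        (by omega)
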